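-- pv_equiv track=rewrite | github.com/MegaGiciorPortas/WDI-Zadania | 05-rekurencja/kolos2324.py | operationC
-- ===== SOURCE A (Python) =====
-- def operationC(n):
--     suma = n
--     number = 0
--     while n > 0:
--         number = number * 10 + (n % 10)
--         n //= 10
--     suma += number
--     return suma
-- ===== SOURCE B (Python) =====
-- def _rev(m):
--     # digit-reversal by place value: the last digit of m is promoted straight
--     # to the leading position of the result (10**(number of digits - 1))
--     if m <= 0:
--         return 0
--     return m % 10 * 10 ** (len(str(m)) - 1) + _rev(m // 10)
--
--
-- def operationC(n):
--     return n + _rev(n)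
-- ===== Notes on version B (the rewrite author's own statement) =====
-- stated objective: alternative
-- what changed: Replaces the accumulator while-loop (number = number*10 + digit) by a top-down place-value recursion that puts each low digit directly at its final power of ten, computed from the decimal length.
import Mathlib
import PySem

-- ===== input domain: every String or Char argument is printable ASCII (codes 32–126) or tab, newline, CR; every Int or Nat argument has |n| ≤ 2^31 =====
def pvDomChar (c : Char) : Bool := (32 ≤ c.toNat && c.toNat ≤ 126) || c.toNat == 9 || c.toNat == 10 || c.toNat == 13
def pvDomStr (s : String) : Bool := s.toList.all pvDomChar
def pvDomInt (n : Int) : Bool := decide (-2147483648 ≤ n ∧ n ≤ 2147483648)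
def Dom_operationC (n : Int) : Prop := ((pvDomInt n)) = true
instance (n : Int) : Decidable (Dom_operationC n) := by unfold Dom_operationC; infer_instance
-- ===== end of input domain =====

-- B replaces A's accumulator while-loop by a top-down place-value recursion
-- (each low digit goes straight to its final power of ten); return values proved equal.

-- ===== PORT A =====
-- the 'while n > 0' loop: state (n, number)
def opCLoop (n number : Int) : Int :=
  if h : 0 < n then
    opCLoop (PySem.Int.floordiv n 10) (number * 10 + PySem.Int.mod n 10)
  else number
termination_by n.toNat
decreasing_by
  have : PySem.Int.floordiv n 10 < n := by
    unfold PySem.Int.floordiv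
    rw [Int.fdiv_eq_ediv_of_nonneg _ (by norm_num)]
    omega
  omega

def operationC (n : Int) : Int :=
  let suma := n
  let number := opCLoop n 0
  suma + number

-- ===== PORT B =====
-- _rev: m % 10 * 10 ** (len(str(m)) - 1) + _rev(m // 10); the exponent is
-- len(str(m)) - 1 ≥ 0 for m > 0, so the .toNat conversion is exact.
def revAlt (m : Int) : Int :=
  if h : m ≤ 0 then 0
  else
    PySem.Int.mod m 10 * 10 ^ (PySem.Str.len (PySem.Int.toStr m) - 1).toNat
      + revAlt (PySem.Int.floordiv m 10)
termination_by m.toNat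
decreasing_by
  have : PySem.Int.floordiv m 10 < m := by
    unfold PySem.Int.floordiv
    rw [Int.fdiv_eq_ediv_of_nonneg _ (by norm_num)]
    omega
  omega

def operationC_alt (n : Int) : Int := n + revAlt n

-- ===== PRECONDITION & SPEC =====
def Spec_operationC (n : Int) (out : Int) : Prop := out = operationC_alt n
instance (n : Int) (out : Int) : Decidable (Spec_operationC n out) := by unfold Spec_operationC; infer_instance

-- ===== CLAIM (what is proved, stated in full; the proofs are below) =====
def Claim_equal_operationC : Prop := ∀ (n : Int), Dom_operationC n → Spec_operationC n (operationC n)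

-- ===== LEMMAS AND PROOFS =====

-- number of decimal digits of m (for m > 0 this is len(str(m)))
def digLen (m : Nat) : Nat := (Nat.toDigits 10 m).length

theorem digLen_pos (m : Nat) : 0 < digLen m := Nat.length_toDigits_pos

theorem digLen_le_iff {m k : Nat} (hk : 0 < k) : digLen m ≤ k ↔ m < 10 ^ k :=
  Nat.length_toDigits_le_iff (by norm_num) hk

theorem lt_pow_digLen (m : Nat) : m < 10 ^ digLen m :=
  (digLen_le_iff (digLen_pos m)).1 le_rfl

theorem pow_digLen_le {m : Nat} (hm : 0 < m) : 10 ^ (digLen m - 1) ≤ m := by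
  rcases Nat.eq_or_lt_of_le (digLen_pos m) with h1 | h1
  · simpa [← h1] using hm
  · by_contra hlt
    rw [not_le] at hlt
    have := (digLen_le_iff (k := digLen m - 1) (by omega)).2 hlt
    omega

theorem digLen_div10 {m : Nat} (hm : 10 ≤ m) : digLen m = digLen (m / 10) + 1 := by
  have h1 : 0 < m / 10 := Nat.le_div_iff_mul_le (by norm_num) |>.2 (by omega)
  have hle : digLen m ≤ digLen (m / 10) + 1 := by
    rw [digLen_le_iff (by omega), pow_succ]
    have := lt_pow_digLen (m / 10)
    have hm10 : m < (m / 10 + 1) * 10 := by omega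
    calc m < (m / 10 + 1) * 10 := hm10
      _ ≤ 10 ^ digLen (m / 10) * 10 := by
          have : m / 10 + 1 ≤ 10 ^ digLen (m / 10) := this
          exact Nat.mul_le_mul_right 10 this
  have hge : digLen (m / 10) + 1 ≤ digLen m := by
    by_contra hlt
    rw [not_le] at hlt
    have hle2 : digLen m ≤ digLen (m / 10) := by omega
    have hmlt : m < 10 ^ digLen (m / 10) :=
      lt_of_lt_of_le (lt_pow_digLen m) (Nat.pow_le_pow_right (by norm_num) hle2)
    -- but 10 ^ digLen (m/10) ≤ 10 * (m/10) ≤ m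
    have hp : 10 ^ (digLen (m / 10) - 1) ≤ m / 10 := pow_digLen_le h1
    have : 10 ^ digLen (m / 10) ≤ 10 * (m / 10) := by
      have hd := digLen_pos (m / 10)
      calc 10 ^ digLen (m / 10) = 10 * 10 ^ (digLen (m / 10) - 1) := by
            rw [← pow_succ']
            congr 1
            omega
        _ ≤ 10 * (m / 10) := Nat.mul_le_mul_left 10 hp
    omega
  omega

-- bridge: PySem ops on positive ints, in Nat terms
theorem floordiv10_eq (m : Int) (hm : 0 ≤ m) :
    PySem.Int.floordiv m 10 = ((m.toNat / 10 : Nat) : Int) := by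
  unfold PySem.Int.floordiv
  rw [Int.fdiv_eq_ediv_of_nonneg _ (by norm_num)]
  omega

theorem mod10_eq (m : Int) (hm : 0 ≤ m) :
    PySem.Int.mod m 10 = ((m.toNat % 10 : Nat) : Int) := by
  unfold PySem.Int.mod
  have h : Int.fmod m 10 = m % 10 + if (0:Int) ≤ 10 ∨ (10:Int) ∣ m then 0 else 10 :=
    Int.fmod_eq_emod
  rw [if_pos (Or.inl (by norm_num))] at h
  omega

theorem strLen_eq_digLen (m : Int) (hm : 0 ≤ m) :
    PySem.Str.len (PySem.Int.toStr m) = (digLen m.toNat : Int) := by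
  unfold PySem.Str.len
  rw [show (PySem.Int.toStr m).toList = PySem.Int.toChars m from PySem.Int.toList_toStr m]
  unfold PySem.Int.toChars digLen
  rw [if_neg (by omega)]

-- revAlt on naturals: revAlt ↑m computed digit-by-digit
theorem revAlt_natCast (m : Nat) :
    revAlt (m : Int) =
      if m = 0 then 0
      else ((m % 10 : Nat) : Int) * 10 ^ (digLen m - 1) + revAlt ((m / 10 : Nat) : Int) := by
  rcases Nat.eq_zero_or_pos m with h | h
  · subst h; simp [revAlt]
  · rw [revAlt, dif_neg (by omega), if_neg (by omega),
      mod10_eq _ (by positivity), floordiv10_eq _ (by positivity),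
      strLen_eq_digLen _ (by positivity)]
    have hd := digLen_pos m
    rw [Int.toNat_natCast]
    congr 2
    simp

-- the central loop invariant: A's loop equals acc shifted past B's reversal
theorem loop_eq (m : Nat) : ∀ acc : Int,
    0 < m → opCLoop (m : Int) acc = acc * 10 ^ digLen m + revAlt (m : Int) := by
  induction m using Nat.strong_induction_on with
  | _ m ih =>
    intro acc hm
    rw [opCLoop, dif_pos (by exact_mod_cast hm),
      mod10_eq _ (by positivity), floordiv10_eq _ (by positivity),
      revAlt_natCast m, if_neg (by omega)]
    simp only [Int.toNat_natCast]
    by_cases h10 : 10 ≤ m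
    · have hdiv : 0 < m / 10 := by omega
      rw [ih (m / 10) (by omega) _ hdiv, digLen_div10 h10]
      have hd1 : 0 < digLen (m / 10) := digLen_pos (m / 10)
      have : digLen (m / 10) + 1 - 1 = digLen (m / 10) := by omega
      rw [this, pow_succ]
      ring
    · -- m < 10: m / 10 = 0, one digit
      have hdiv : m / 10 = 0 := by omega
      have hd : digLen m = 1 := by
        have h1 := digLen_pos m
        have h2 : digLen m ≤ 1 := (digLen_le_iff (by norm_num)).2 (by omega)
        omega
      have hmod : m % 10 = m := by omega
      rw [hdiv, hmod, hd]
      rw [opCLoop, dif_neg (by norm_num)]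
      rw [show revAlt ((0 : Nat) : Int) = 0 by simp [revAlt]]
      push_cast
      ring

theorem opCLoop_nonpos (n : Int) (hn : n ≤ 0) : opCLoop n 0 = 0 := by
  rw [opCLoop, dif_neg (by omega)]

theorem revAlt_nonpos (n : Int) (hn : n ≤ 0) : revAlt n = 0 := by
  rw [revAlt, dif_pos hn]

-- ===== VERDICT (by name: the statement is the Claim_ definition above) =====
theorem operationC_spec : Claim_equal_operationC := by
  intro n _
  unfold Spec_operationC operationC operationC_alt
  by_cases h : n ≤ 0
  · rw [opCLoop_nonpos n h, revAlt_nonpos n h]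
  · have hn : n = ((n.toNat : Nat) : Int) := by omega
    rw [hn, loop_eq n.toNat 0 (by omega)]
    simp
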